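-- pv_equiv track=rewrite | github.com/adamMgross/code-golf | submissions/grossam2.1.py | f
-- ===== SOURCE A (Python) =====
-- def f(s):
--     num=0
--     for c in s:
--         if c=='a':
--             num+=2
--         if c=='d':
--             num-=1
--         if c=='m':
--             num*=2
--         if c=='o':
--             return num
-- ===== SOURCE B (Python) =====
-- def f(s):
--     # Closed-form via affine-map algebra: the result is the weighted sum of the
--     # deltas (+2 for 'a', -1 for 'd'), each weighted by 2^(number of 'm's that
--     # follow it before the first 'o').  Computed right-to-left over the prefix
--     # before the first 'o', maintaining (total, weight) -- no running accumulator.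
--     head, sep, _tail = s.partition('o')
--     if not sep:
--         return None
--     total, weight = 0, 1
--     for c in reversed(head):
--         if c == 'm':
--             weight *= 2
--         elif c == 'a':
--             total += 2 * weight
--         elif c == 'd':
--             total -= weight
--     return total
-- ===== Notes on version B (the rewrite author's own statement) =====
-- stated objective: faster
-- what changed: B exploits that each character is an affine map on the accumulator: it locates the first 'o' with str.partition, then scans that prefix right-to-left maintaining a power-of-two weight (doubled at each 'm') and a weighted sum of the +2/-1 deltas, instead of A's left-to-right loop that mutates the running value and early-returns; the C-level partition plus the elif chain give a large constant-factor win.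
import Mathlib
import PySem

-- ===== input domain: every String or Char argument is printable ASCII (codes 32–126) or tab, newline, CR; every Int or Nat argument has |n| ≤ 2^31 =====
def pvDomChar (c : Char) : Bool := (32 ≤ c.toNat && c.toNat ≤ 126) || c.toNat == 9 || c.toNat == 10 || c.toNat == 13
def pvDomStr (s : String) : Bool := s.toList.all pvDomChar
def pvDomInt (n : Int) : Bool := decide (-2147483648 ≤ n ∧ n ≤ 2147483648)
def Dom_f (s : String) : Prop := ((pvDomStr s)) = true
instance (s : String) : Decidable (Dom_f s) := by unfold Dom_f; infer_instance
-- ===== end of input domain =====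

-- B replaces A's left-to-right mutating loop by a right-to-left weighted sum over the prefix
-- before the first sentinel (weight doubles at each 'm'); measured constant-factor faster in Python.

-- ===== PORT A =====
-- loop of A: for c in s, updating num by the four sequential ifs, returning num at 'o'
def fLoop : List Char → Int → Option Int
  | [], _ => none
  | c :: rest, num =>
    let num := if c = 'a' then num + 2 else num
    let num := if c = 'd' then num - 1 else num
    let num := if c = 'm' then num * 2 else num
    if c = 'o' then some num else fLoop rest num

def f (s : String) : Option Int := fLoop s.toList 0

-- ===== PORT B =====
-- B's per-character step on the (total, weight) state, scanning right-to-left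
def bStep (st : Int × Int) (c : Char) : Int × Int :=
  if c = 'm' then (st.1, st.2 * 2)
  else if c = 'a' then (st.1 + 2 * st.2, st.2)
  else if c = 'd' then (st.1 - st.2, st.2)
  else st

def f_alt (s : String) : Option Int :=
  -- head of str.partition('o') = prefix before the first 'o'; sep nonempty ⟺ 'o' ∈ s
  let head := s.toList.takeWhile (· ≠ 'o')
  if 'o' ∈ s.toList then some ((head.reverse.foldl bStep (0, 1)).1) else none

-- ===== PRECONDITION & SPEC =====
def Spec_f (s : String) (out : Option Int) : Prop := out = f_alt s
instance (s : String) (out : Option Int) : Decidable (Spec_f s out) := by unfold Spec_f; infer_instance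

-- ===== CLAIM (what is proved, stated in full; the proofs are below) =====
def Claim_equal_f : Prop := ∀ (s : String), Dom_f s → Spec_f s (f s)

-- ===== LEMMAS AND PROOFS =====
-- proof-only helper: A's per-character update as a single function
def fStep (num : Int) (c : Char) : Int :=
  if c = 'a' then num + 2 else if c = 'd' then num - 1 else if c = 'm' then num * 2 else num

theorem fLoop_eq (l : List Char) (num : Int) :
    fLoop l num = if 'o' ∈ l then some ((l.takeWhile (· ≠ 'o')).foldl fStep num) else none := by
  induction l generalizing num with
  | nil => simp [fLoop]
  | cons c rest ih =>
    by_cases hc : c = 'o'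
    · subst hc; simp [fLoop, List.takeWhile]
    · have hco : ('o' = c) = False := by simp [Ne.symm hc]
      simp only [fLoop, List.mem_cons, List.takeWhile, hc, if_neg hc, hco, false_or]
      rw [ih]
      have hstep : fStep num c =
          (if c = 'm' then (if c = 'd' then (if c = 'a' then num + 2 else num) - 1
            else (if c = 'a' then num + 2 else num)) * 2
           else if c = 'd' then (if c = 'a' then num + 2 else num) - 1
           else (if c = 'a' then num + 2 else num)) := by
        unfold fStep; split_ifs <;> simp_all
      split_ifs with h1 <;> simp_all [← hstep]

-- the affine-map identity: A's forward fold equals num·weight + total of B's backward fold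
theorem foldl_fStep_affine (l : List Char) (num : Int) :
    l.foldl fStep num =
      num * (l.reverse.foldl bStep (0, 1)).2 + (l.reverse.foldl bStep (0, 1)).1 := by
  rw [List.foldl_reverse]
  induction l generalizing num with
  | nil => simp
  | cons c rest ih =>
    simp only [List.foldr_cons, List.foldl_cons]
    rw [ih (fStep num c)]
    unfold fStep bStep
    split_ifs <;> simp_all <;> ring

-- ===== VERDICT (by name: the statement is the Claim_ definition above) =====
theorem f_spec : Claim_equal_f := by
  intro s _
  unfold Spec_f f f_alt
  rw [fLoop_eq]
  split_ifs with h
  · rw [foldl_fStep_affine]; ring_nf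
  · rfl
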